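-- pv_equiv track=rewrite | github.com/GitMaster9/BibleVerse | modules/Bible.py | extract_book_new_testament
-- ===== SOURCE A (Python) =====
-- def extract_book_new_testament(lines):
--     book = []
--     verse = 0
--     digits = 0
--     text = ""
--
--     for line in lines:
--         for i in range(len(line)):
--             if line[i].isdigit():
--                 if digits == 0:
--                     book.append(text)
--                     verse += 1
--                     text = ""
--
--                 digits += 1
--             else:
--                 digits = 0
--
--             text += line[i]
--
--     book.append(text)
--
--     return book
-- ===== SOURCE B (Python) =====
-- def extract_book_new_testament(lines):
--     full = "".join(lines)
--     bounds = [i for i in range(len(full))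
--               if full[i].isdigit() and (i == 0 or not full[i - 1].isdigit())]
--     return [full[a:b] for a, b in zip([0] + bounds, bounds + [len(full)])]
-- ===== Notes on version B (the rewrite author's own statement) =====
-- stated objective: simpler
-- what changed: A's single-pass character state machine (book/verse/digits/text accumulators mutated per char) is replaced by a two-pass decomposition: join the lines, collect the indices where a digit run starts, then slice the joined string between consecutive boundaries.
import Mathlib
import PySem

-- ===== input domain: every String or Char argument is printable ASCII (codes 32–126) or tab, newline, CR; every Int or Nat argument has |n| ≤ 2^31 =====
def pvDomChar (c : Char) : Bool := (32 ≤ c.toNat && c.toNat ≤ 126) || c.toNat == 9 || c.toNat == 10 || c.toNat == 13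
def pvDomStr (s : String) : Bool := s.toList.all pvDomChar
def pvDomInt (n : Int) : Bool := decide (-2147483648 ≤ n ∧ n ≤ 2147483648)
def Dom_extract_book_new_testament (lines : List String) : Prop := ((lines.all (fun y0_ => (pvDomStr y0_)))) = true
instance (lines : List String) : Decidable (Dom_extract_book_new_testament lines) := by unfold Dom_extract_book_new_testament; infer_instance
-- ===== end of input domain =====

-- B replaces A's per-character accumulator state machine by a two-pass decomposition
-- (collect digit-run start indices over the joined string, then slice between them);
-- objective: simpler.  (Python str.isdigit on the ASCII domain = Char.isDigit.)

-- ===== PORT A =====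
-- state = (book, verse, digits, text); text kept as List Char ('text += line[i]' = text ++ [c])
def aStep (st : List String × Int × Int × List Char) (c : Char) :
    List String × Int × Int × List Char :=
  let (book, verse, digits, text) := st
  if c.isDigit then
    if digits = 0 then (book ++ [String.ofList text], verse + 1, digits + 1, [c])
    else (book, verse, digits + 1, text ++ [c])
  else (book, verse, 0, text ++ [c])

def extract_book_new_testament (lines : List String) : List String :=
  match lines.foldl (fun st line => line.toList.foldl aStep st) ([], 0, 0, []) with
  | (book, _, _, text) => book ++ [String.ofList text]   -- final book.append(text)

-- ===== PORT B =====
-- full[a:b] with 0 ≤ a ≤ b (b clamped at the length, like Python) = (drop a).take (b-a)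
def bSlice (full : List Char) (a b : Nat) : List Char := (full.drop a).take (b - a)

def extract_book_new_testament_alt (lines : List String) : List String :=
  let full : List Char := (lines.map String.toList).flatten   -- "".join(lines)
  let bounds := (List.range full.length).filter (fun i =>
      (full.getD i ' ').isDigit && (i == 0 || !(full.getD (i - 1) ' ').isDigit))
  (List.zip (0 :: bounds) (bounds ++ [full.length])).map
    (fun p => String.ofList (bSlice full p.1 p.2))

-- ===== PRECONDITION & SPEC =====
def Spec_extract_book_new_testament (lines : List String) (out : List String) : Prop := out = extract_book_new_testament_alt lines
instance (lines : List String) (out : List String) : Decidable (Spec_extract_book_new_testament lines out) := by unfold Spec_extract_book_new_testament; infer_instance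

-- ===== CLAIM (what is proved, stated in full; the proofs are below) =====
def Claim_equal_extract_book_new_testament : Prop := ∀ (lines : List String), Dom_extract_book_new_testament lines → Spec_extract_book_new_testament lines (extract_book_new_testament lines)

-- ===== LEMMAS AND PROOFS =====

-- reference segmentation: (first chunk, later chunks), cutting where a digit run starts
def seg (prev : Bool) : List Char → List Char × List (List Char)
  | [] => ([], [])
  | c :: cs =>
    let r := seg c.isDigit cs
    if c.isDigit && !prev then ([], (c :: r.1) :: r.2) else (c :: r.1, r.2)

-- recursive form of B's boundary list
def bnd (prev : Bool) : List Char → List Nat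
  | [] => []
  | c :: cs => (if c.isDigit && !prev then [0] else []) ++ (bnd c.isDigit cs).map Nat.succ

-- ---- A side ----
theorem aRun_eq (cs : List Char) : ∀ (book : List String) (verse digits : Int)
    (text : List Char) (prev : Bool), 0 ≤ digits → (prev = decide (digits ≠ 0)) →
    (cs.foldl aStep (book, verse, digits, text)).1 ++
      [String.ofList (cs.foldl aStep (book, verse, digits, text)).2.2.2] =
    book ++ String.ofList (text ++ (seg prev cs).1) :: (seg prev cs).2.map String.ofList := by
  induction cs with
  | nil => intro book verse digits text prev _ _; simp [seg]
  | cons c cs ih =>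
    intro book verse digits text prev hd hp
    by_cases hc : c.isDigit
    · by_cases h0 : digits = 0
      · have hprev : prev = false := by subst hp h0; simp
        simp only [List.foldl_cons, aStep, hc, h0, if_true]
        rw [ih (book ++ [String.ofList text]) (verse + 1) (0 + 1) [c] true (by omega) (by decide)]
        simp [seg, hc, hprev]
      · have hprev : prev = true := by subst hp; simp [h0]
        simp only [List.foldl_cons, aStep, hc, if_true, if_neg h0]
        rw [ih book verse (digits + 1) (text ++ [c]) true (by omega) (by simp; omega)]
        simp [seg, hc, hprev]
    · simp only [List.foldl_cons, aStep, hc, Bool.false_eq_true, if_false]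
      rw [ih book verse 0 (text ++ [c]) false (by omega) (by simp)]
      simp [seg, hc]

theorem aPort_eq (lines : List String) :
    extract_book_new_testament lines =
    String.ofList (seg false (lines.map String.toList).flatten).1 ::
      (seg false (lines.map String.toList).flatten).2.map String.ofList := by
  unfold extract_book_new_testament
  have hflat := List.foldl_flatten (f := aStep) (L := lines.map String.toList)
    (b := (([] : List String), (0 : Int), (0 : Int), ([] : List Char)))
  simp only [List.foldl_map] at hflat
  have h := aRun_eq ((lines.map String.toList).flatten) [] 0 0 [] false (by omega) (by simp)
  rw [hflat] at h
  simp only [List.nil_append] at h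
  exact h

-- ---- B side ----
-- the port's filter predicate, in prev-carrying form
def P' (prev : Bool) (cs : List Char) (i : Nat) : Bool :=
  (cs.getD i ' ').isDigit && !(if i = 0 then prev else (cs.getD (i - 1) ' ').isDigit)

theorem filter_eq_bnd (cs : List Char) : ∀ (prev : Bool),
    (List.range cs.length).filter (P' prev cs) = bnd prev cs := by
  induction cs with
  | nil => intro prev; simp [bnd]
  | cons c cs ih =>
    intro prev
    rw [List.length_cons, List.range_succ_eq_map, List.filter_cons, List.filter_map]
    have h0 : P' prev (c :: cs) 0 = (c.isDigit && !prev) := by simp [P']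
    have hs : (P' prev (c :: cs)) ∘ Nat.succ = P' c.isDigit cs := by
      funext i
      simp only [Function.comp, P', Nat.succ_ne_zero, if_false, List.getD_cons_succ,
        Nat.succ_sub_one]
      cases i with
      | zero => simp
      | succ j => simp
    rw [h0, hs, ih c.isDigit]
    cases h : c.isDigit && !prev <;> simp [bnd, h]

-- slices of (c :: cs) at shifted bounds, beyond the head pair
theorem zip_slice_shift (c : Char) (cs : List Char) :
    ∀ (B : List Nat) (a : Nat),
    (List.zip (Nat.succ a :: B.map Nat.succ) (B.map Nat.succ ++ [cs.length + 1])).map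
        (fun p => bSlice (c :: cs) p.1 p.2) =
    (List.zip (a :: B) (B ++ [cs.length])).map (fun p => bSlice cs p.1 p.2) := by
  intro B
  induction B with
  | nil => intro a; simp [bSlice, Nat.succ_sub_succ]
  | cons b B ih =>
    intro a
    simp only [List.map_cons, List.cons_append, List.zip_cons_cons, List.map]
    rw [ih b]
    simp [bSlice, Nat.succ_sub_succ]

theorem zip_slice_head (c : Char) (cs : List Char) (B : List Nat) :
    (List.zip (0 :: B.map Nat.succ) (B.map Nat.succ ++ [cs.length + 1])).map
        (fun p => bSlice (c :: cs) p.1 p.2) =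
    List.modifyHead (fun x => c :: x)
      ((List.zip (0 :: B) (B ++ [cs.length])).map (fun p => bSlice cs p.1 p.2)) := by
  cases B with
  | nil => simp [bSlice]
  | cons b B =>
    simp only [List.map_cons, List.cons_append, List.zip_cons_cons, List.map,
      List.modifyHead]
    rw [zip_slice_shift c cs B b]
    simp [bSlice]

theorem chunks_eq_seg (cs : List Char) : ∀ (prev : Bool),
    (List.zip (0 :: bnd prev cs) (bnd prev cs ++ [cs.length])).map
        (fun p => bSlice cs p.1 p.2) =
    (seg prev cs).1 :: (seg prev cs).2 := by
  induction cs with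
  | nil => intro prev; simp [bnd, seg, bSlice]
  | cons c cs ih =>
    intro prev
    cases h : c.isDigit && !prev
    · rw [show bnd prev (c :: cs) = (bnd c.isDigit cs).map Nat.succ from by simp [bnd, h]]
      rw [List.length_cons, zip_slice_head c cs (bnd c.isDigit cs), ih c.isDigit]
      simp [seg, h]
    · rw [show bnd prev (c :: cs) = 0 :: (bnd c.isDigit cs).map Nat.succ from by simp [bnd, h]]
      simp only [List.length_cons, List.cons_append, List.zip_cons_cons, List.map_cons]
      rw [zip_slice_head c cs (bnd c.isDigit cs), ih c.isDigit]
      simp [seg, h, bSlice]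

theorem bPort_eq (lines : List String) :
    extract_book_new_testament_alt lines =
    String.ofList (seg false (lines.map String.toList).flatten).1 ::
      (seg false (lines.map String.toList).flatten).2.map String.ofList := by
  unfold extract_book_new_testament_alt
  have hb : ((List.range ((lines.map String.toList).flatten).length).filter (fun i =>
      ((lines.map String.toList).flatten.getD i ' ').isDigit &&
        (i == 0 || !((lines.map String.toList).flatten.getD (i - 1) ' ').isDigit))) =
      bnd false (lines.map String.toList).flatten := by
    rw [← filter_eq_bnd]
    apply List.filter_congr
    intro i _
    simp only [P']
    cases i <;> simp
  simp only [hb]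
  have hc := chunks_eq_seg (lines.map String.toList).flatten false
  calc (List.zip (0 :: bnd false (lines.map String.toList).flatten)
          (bnd false (lines.map String.toList).flatten ++ [(lines.map String.toList).flatten.length])).map
          (fun p => String.ofList (bSlice (lines.map String.toList).flatten p.1 p.2))
      = ((List.zip (0 :: bnd false (lines.map String.toList).flatten)
          (bnd false (lines.map String.toList).flatten ++ [(lines.map String.toList).flatten.length])).map
          (fun p => bSlice (lines.map String.toList).flatten p.1 p.2)).map String.ofList := by
        rw [List.map_map]; rfl
    _ = _ := by rw [hc]; simp

-- ===== VERDICT (by name: the statement is the Claim_ definition above) =====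
theorem extract_book_new_testament_spec : Claim_equal_extract_book_new_testament := by
  intro lines _
  unfold Spec_extract_book_new_testament
  rw [aPort_eq, bPort_eq]
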